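-- pv_equiv track=rewrite | github.com/virgolus/rfid_media_player | rfid_media_player.py | get_uri_from_rfid_tag
-- ===== SOURCE A (Python) =====
-- def get_uri_from_rfid_tag(tag_records):
--     """ Search track id. It's a string delimited by $$ """
--
--     track_uri = ""
--
--     sequence = 0
--     for record in tag_records:
--         if "$$" in record and sequence == 0:
--             track_uri += record.partition("$$")[2]
--             sequence += 1
--         elif "$$" not in record and sequence > 0:
--             track_uri += record
--             sequence += 1
--         elif "$$" in record and sequence > 0:
--             track_uri += record.partition("$$")[0]
--             break
--
--     return track_uri
-- ===== SOURCE B (Python) =====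
-- def get_uri_from_rfid_tag(tag_records):
--     """ Search track id. It's a string delimited by $$ """
--     # Build the list of indices of records containing the delimiter once,
--     # then assemble the answer from slices; no sequential state at all.
--     hits = [k for k, r in enumerate(tag_records) if "$$" in r]
--     if not hits:
--         return ""
--     i = hits[0]
--     head = tag_records[i].partition("$$")[2]
--     if len(hits) > 1:
--         j = hits[1]
--         return head + "".join(tag_records[i + 1:j]) + tag_records[j].partition("$$")[0]
--     return head + "".join(tag_records[i + 1:])
-- ===== Notes on version B (the rewrite author's own statement) =====
-- stated objective: alternative
-- what changed: Replaced A's single stateful loop (a 'sequence' counter with a three-way branch and break) by an index-based assembly: build the list of indices of records containing '$$' once with a comprehension, then return the answer from list slices and one ''.join with no sequential state.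
import Mathlib
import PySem

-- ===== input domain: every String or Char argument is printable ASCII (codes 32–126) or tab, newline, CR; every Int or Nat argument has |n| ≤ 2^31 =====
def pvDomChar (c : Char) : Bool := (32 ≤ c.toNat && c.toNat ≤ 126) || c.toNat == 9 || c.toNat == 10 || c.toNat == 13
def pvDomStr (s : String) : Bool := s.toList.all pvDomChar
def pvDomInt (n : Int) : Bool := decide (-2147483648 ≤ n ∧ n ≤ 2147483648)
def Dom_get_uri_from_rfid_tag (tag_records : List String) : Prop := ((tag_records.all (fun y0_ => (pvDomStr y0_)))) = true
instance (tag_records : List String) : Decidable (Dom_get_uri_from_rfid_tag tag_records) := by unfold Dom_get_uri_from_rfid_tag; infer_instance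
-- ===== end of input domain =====

-- B replaces A's sequential loop with a 'sequence' counter by an index-based assembly:
-- it first builds the list of indices of records containing "$$", then returns the answer
-- from list slices and one join — simpler in the sense of stateless, same cost.

-- record.partition("$$")[2]: exact hand port of str.partition — find points at the FIRST
-- occurrence; called only when "$$" in record, so find ≥ 0 and [2] is the slice after it.
def pvPartAfter (r : String) : String :=
  PySem.Str.slice r (some (PySem.Str.find r "$$" + 2)) none

-- record.partition("$$")[0]: the part before the first occurrence (same exactness note).
def pvPartBefore (r : String) : String :=
  PySem.Str.slice r none (some (PySem.Str.find r "$$"))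

-- ===== PORT A =====
-- the for-loop with (track_uri, sequence) state; 'break' ends the recursion
def pvGoA : List String → String → Int → String
  | [], uri, _ => uri
  | r :: rest, uri, seq =>
    if PySem.Str.isIn "$$" r = true ∧ seq = 0 then
      pvGoA rest (uri ++ pvPartAfter r) (seq + 1)
    else if PySem.Str.isIn "$$" r = false ∧ seq > 0 then
      pvGoA rest (uri ++ r) (seq + 1)
    else if PySem.Str.isIn "$$" r = true ∧ seq > 0 then
      uri ++ pvPartBefore r
    else
      pvGoA rest uri seq

def get_uri_from_rfid_tag (tag_records : List String) : String :=
  pvGoA tag_records "" 0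

-- ===== PORT B =====
-- hits = [k for k, r in enumerate(tag_records) if "$$" in r]
def pvHits (l : List String) : List Int :=
  ((PySem.List.enumerate l).filter (fun p => PySem.Str.isIn "$$" p.2)).map (fun p => p.1)

def get_uri_from_rfid_tag_alt (tag_records : List String) : String :=
  match pvHits tag_records with
  | [] => ""                                    -- if not hits: return ""
  | i :: rest =>
    -- head = tag_records[i].partition("$$")[2]; i comes from enumerate so it is in range
    let head := pvPartAfter (PySem.List.pyGetD tag_records i "")
    match rest with
    | j :: _ =>                                 -- len(hits) > 1; j = hits[1]
      head ++ PySem.Str.join "" (PySem.List.slice tag_records (some (i + 1)) (some j))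
           ++ pvPartBefore (PySem.List.pyGetD tag_records j "")
    | [] =>
      head ++ PySem.Str.join "" (PySem.List.slice tag_records (some (i + 1)) none)

-- ===== PRECONDITION & SPEC =====
def Spec_get_uri_from_rfid_tag (tag_records : List String) (out : String) : Prop := out = get_uri_from_rfid_tag_alt tag_records
instance (tag_records : List String) (out : String) : Decidable (Spec_get_uri_from_rfid_tag tag_records out) := by unfold Spec_get_uri_from_rfid_tag; infer_instance

-- ===== CLAIM (what is proved, stated in full; the proofs are below) =====
def Claim_equal_get_uri_from_rfid_tag : Prop := ∀ (tag_records : List String), Dom_get_uri_from_rfid_tag tag_records → Spec_get_uri_from_rfid_tag tag_records (get_uri_from_rfid_tag tag_records)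

-- ===== LEMMAS AND PROOFS =====

-- canonical middle form used only in the proofs: find the opening record, then collect
def pvFindOpen : List String → Option (String × List String)
  | [] => none
  | r :: rest =>
    if PySem.Str.isIn "$$" r = true then some (pvPartAfter r, rest)
    else pvFindOpen rest

def pvCollect : List String → String → String
  | [], uri => uri
  | r :: rest, uri =>
    if PySem.Str.isIn "$$" r = true then uri ++ pvPartBefore r
    else pvCollect rest (uri ++ r)

def pvHelperAlt (l : List String) : String :=
  match pvFindOpen l with
  | none => ""
  | some (uri, rest) => pvCollect rest uri

-- Nat-valued hit indices, structurally
def natHits : List String → List Nat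
  | [] => []
  | r :: rs =>
    if PySem.Str.isIn "$$" r = true then 0 :: (natHits rs).map (· + 1)
    else (natHits rs).map (· + 1)

theorem interc_nil_cons (r : List Char) (rs : List (List Char)) :
    ([] : List Char).intercalate (r :: rs) = r ++ ([] : List Char).intercalate rs := by
  simp [List.intercalate]
  induction rs with
  | nil => simp
  | cons b bs ih => simp_all [List.intersperse]

theorem pvJoin_cons (r : String) (rs : List String) :
    PySem.Str.join "" (r :: rs) = r ++ PySem.Str.join "" rs := by
  apply String.toList_inj.mp
  simp [PySem.Str.toList_join, PySem.Chars.join, interc_nil_cons]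

theorem pvJoin_nil : PySem.Str.join "" ([] : List String) = "" := by
  apply String.toList_inj.mp
  simp [PySem.Str.toList_join, PySem.Chars.join, List.intercalate]

-- pvHits from any start index is natHits shifted
theorem map_shift (s : Int) (t : List Nat) :
    (t.map (· + 1)).map (fun k : Nat => s + (k : Int))
      = t.map (fun k : Nat => (s + 1) + (k : Int)) := by
  rw [List.map_map]
  apply List.map_congr_left
  intro a _
  simp [Function.comp]
  ring

theorem hitsFrom_shape (l : List String) : ∀ (s : Int),
    ((PySem.List.enumerate l s).filter (fun p => PySem.Str.isIn "$$" p.2)).map (fun p => p.1)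
      = (natHits l).map (fun k : Nat => s + (k : Int)) := by
  induction l with
  | nil => intro s; simp [PySem.List.enumerate_nil, natHits]
  | cons r rs ih =>
    intro s
    rw [PySem.List.enumerate_cons]
    by_cases h : PySem.Str.isIn "$$" r = true
    · rw [natHits, if_pos h,
        show List.filter (fun p => PySem.Str.isIn "$$" p.2) ((s, r) :: PySem.List.enumerate rs (s + 1))
          = (s, r) :: List.filter (fun p => PySem.Str.isIn "$$" p.2) (PySem.List.enumerate rs (s + 1)) from
          List.filter_cons_of_pos h,
        List.map_cons, List.map_cons, ih (s + 1), map_shift]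
      norm_num
    · rw [natHits, if_neg h,
        show List.filter (fun p => PySem.Str.isIn "$$" p.2) ((s, r) :: PySem.List.enumerate rs (s + 1))
          = List.filter (fun p => PySem.Str.isIn "$$" p.2) (PySem.List.enumerate rs (s + 1)) from
          List.filter_cons_of_neg h,
        ih (s + 1), map_shift]

theorem pvHits_eq (l : List String) : pvHits l = (natHits l).map (fun k : Nat => (k : Int)) := by
  unfold pvHits
  rw [hitsFrom_shape l 0]
  apply List.map_congr_left
  intro a _
  ring

-- pvCollect characterised by the first hit index of its input
theorem collect_char (rs : List String) : ∀ (uri : String),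
    pvCollect rs uri = uri ++ (match natHits rs with
      | [] => PySem.Str.join "" rs
      | k :: _ => PySem.Str.join "" (rs.take k) ++ pvPartBefore (rs.getD k "")) := by
  induction rs with
  | nil => intro uri; simp [pvCollect, natHits, pvJoin_nil]
  | cons r rs ih =>
    intro uri
    by_cases h : PySem.Chars.isIn ['$', '$'] r.toList = true
    · simp [pvCollect, natHits, h, pvJoin_nil]
    · simp only [Bool.not_eq_true] at h
      rw [show pvCollect (r :: rs) uri = pvCollect rs (uri ++ r) by simp [pvCollect, h],
        ih (uri ++ r)]
      cases hn : natHits rs with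
      | nil => simp [natHits, h, hn, pvJoin_cons, String.append_assoc]
      | cons k ks =>
        simp [natHits, h, hn, pvJoin_cons, String.append_assoc]

-- pvFindOpen characterised by natHits
theorem findOpen_char (l : List String) :
    (natHits l = [] → pvFindOpen l = none) ∧
    (∀ i rest, natHits l = i :: rest →
      pvFindOpen l = some (pvPartAfter (l.getD i ""), l.drop (i + 1)) ∧
      rest = (natHits (l.drop (i + 1))).map (· + (i + 1))) := by
  induction l with
  | nil => exact ⟨fun _ => rfl, fun i rest h => by simp [natHits] at h⟩
  | cons r rs ih =>
    by_cases h : PySem.Chars.isIn ['$', '$'] r.toList = true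
    · refine ⟨fun hc => by simp [natHits, h] at hc, fun i rest hc => ?_⟩
      simp [natHits, h] at hc
      obtain ⟨hi, hrest⟩ := hc
      subst hi
      refine ⟨by simp [pvFindOpen, h], ?_⟩
      simpa using hrest.symm
    · simp only [Bool.not_eq_true] at h
      constructor
      · intro hc
        simp [natHits, h] at hc
        simp [pvFindOpen, h, ih.1 hc]
      · intro i rest hc
        simp [natHits, h] at hc
        cases hn : natHits rs with
        | nil => rw [hn] at hc; simp at hc
        | cons k ks =>
          rw [hn] at hc
          simp at hc
          obtain ⟨hi, hrest⟩ := hc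
          obtain ⟨hfo, hks⟩ := (ih.2 k ks hn)
          subst hi
          constructor
          · rw [show pvFindOpen (r :: rs) = pvFindOpen rs from by simp [pvFindOpen, h], hfo,
              List.getD_cons_succ, List.drop_succ_cons]
          · rw [← hrest, hks, List.map_map]
            apply List.map_congr_left
            intro a _
            simp [Function.comp]
            omega

theorem slice_from_cast (l : List String) (i : Nat) :
    PySem.List.slice l (some ((i : Int) + 1)) none = l.drop (i + 1) := by
  rw [show ((i : Int) + 1) = ((i + 1 : Nat) : Int) from by push_cast; ring,
    PySem.List.slice_from_natCast]

theorem slice_cast (l : List String) (i j : Nat) :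
    PySem.List.slice l (some ((i : Int) + 1)) (some (j : Int)) = (l.drop (i + 1)).take (j - (i + 1)) := by
  rw [show ((i : Int) + 1) = ((i + 1 : Nat) : Int) from by push_cast; ring,
    PySem.List.slice_natCast]

-- B's port rewritten through natHits
theorem alt_char (l : List String) :
    get_uri_from_rfid_tag_alt l = (match natHits l with
      | [] => ""
      | i :: rest =>
        match rest with
        | [] => pvPartAfter (l.getD i "") ++ PySem.Str.join "" (l.drop (i + 1))
        | j :: _ => pvPartAfter (l.getD i "") ++
            PySem.Str.join "" ((l.drop (i + 1)).take (j - (i + 1))) ++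
            pvPartBefore (l.getD j "")) := by
  unfold get_uri_from_rfid_tag_alt
  rw [pvHits_eq]
  cases hn : natHits l with
  | nil => simp
  | cons i rest =>
    cases rest with
    | nil =>
      simp only [List.map_cons, List.map_nil, slice_from_cast, PySem.List.pyGetD_natCast]
    | cons j js =>
      simp only [List.map_cons, slice_cast, PySem.List.pyGetD_natCast]

-- the middle form equals B
theorem helper_eq (l : List String) : pvHelperAlt l = get_uri_from_rfid_tag_alt l := by
  rw [alt_char]
  cases hn : natHits l with
  | nil => simp [pvHelperAlt, (findOpen_char l).1 hn]
  | cons i rest =>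
    obtain ⟨hfo, hrest⟩ := (findOpen_char l).2 i rest hn
    rw [pvHelperAlt, hfo]
    simp only []
    rw [collect_char]
    cases hd : natHits (l.drop (i + 1)) with
    | nil =>
      rw [hd] at hrest
      simp at hrest
      simp [hrest]
    | cons k ks =>
      rw [hd] at hrest
      simp only [List.map] at hrest
      subst hrest
      simp only []
      rw [show k + (i + 1) - (i + 1) = k by omega]
      have hg : (l.drop (i + 1)).getD k "" = l.getD (k + (i + 1)) "" := by
        rw [List.getD_eq_getElem?_getD, List.getD_eq_getElem?_getD, List.getElem?_drop,
          Nat.add_comm]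
      rw [hg, String.append_assoc]

-- once sequence > 0, A's loop is exactly the collect phase
theorem pvGoA_pos (rest : List String) : ∀ (uri : String) (seq : Int), seq > 0 →
    pvGoA rest uri seq = pvCollect rest uri := by
  induction rest with
  | nil => intro uri seq _; rfl
  | cons r rs ih =>
    intro uri seq hseq
    by_cases h : PySem.Chars.isIn ['$', '$'] r.toList = true
    all_goals simp only [Bool.not_eq_true] at h
    · simp [pvGoA, pvCollect, h, hseq]
      omega
    · simp [pvGoA, pvCollect, h, hseq, ih _ (seq + 1) (by omega)]

-- A's sequence = 0 phase is the find phase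
theorem pvGoA_zero (l : List String) : pvGoA l "" 0 = pvHelperAlt l := by
  induction l with
  | nil => rfl
  | cons r rs ih =>
    by_cases h : PySem.Chars.isIn ['$', '$'] r.toList = true
    all_goals simp only [Bool.not_eq_true] at h
    · simp [pvGoA, pvHelperAlt, pvFindOpen, h,
        pvGoA_pos rs (pvPartAfter r) 1 (by omega)]
    · simpa [pvGoA, pvHelperAlt, pvFindOpen, h] using ih

-- ===== VERDICT (by name: the statement is the Claim_ definition above) =====
theorem get_uri_from_rfid_tag_spec : Claim_equal_get_uri_from_rfid_tag := by
  intro tag_records _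
  unfold Spec_get_uri_from_rfid_tag get_uri_from_rfid_tag
  rw [pvGoA_zero, helper_eq]
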